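-- pv_equiv track=rewrite | github.com/Bystroushaak/random_name_mixer | random_names_generator.py | repeat_penalty
-- ===== SOURCE A (Python) =====
-- VOWELS = list("aeiouáéíóúůyý")
--
-- def repeat_penalty(word):
--     old = ""
--     score = 0
--     penalty = 0
--     for char in list(word) + [""]:
--         if char == old and char in VOWELS:
--             penalty += 1
--         else:
--             score += penalty ** 3
--             penalty = 0
--
--         old = char
--
--     score += penalty ** 3
--     return score
-- ===== SOURCE B (Python) =====
-- VOWELS = list("aeiouáéíóúůyý")
--
-- def repeat_penalty(word):
--     score = 0
--     i = 0
--     n = len(word)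
--     while i < n:
--         j = i + 1
--         while j < n and word[j] == word[i]:
--             j += 1
--         if word[i] in VOWELS:
--             score += (j - i - 1) ** 3
--         i = j
--     return score
-- ===== Notes on version B (the rewrite author's own statement) =====
-- stated objective: faster
-- what changed: B scans the word as maximal runs of equal characters with a two-index run finder and adds (run-1)**3 per vowel run, dropping A's sentinel element, the per-character list materialisation and the old/penalty state variables.
import Mathlib
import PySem

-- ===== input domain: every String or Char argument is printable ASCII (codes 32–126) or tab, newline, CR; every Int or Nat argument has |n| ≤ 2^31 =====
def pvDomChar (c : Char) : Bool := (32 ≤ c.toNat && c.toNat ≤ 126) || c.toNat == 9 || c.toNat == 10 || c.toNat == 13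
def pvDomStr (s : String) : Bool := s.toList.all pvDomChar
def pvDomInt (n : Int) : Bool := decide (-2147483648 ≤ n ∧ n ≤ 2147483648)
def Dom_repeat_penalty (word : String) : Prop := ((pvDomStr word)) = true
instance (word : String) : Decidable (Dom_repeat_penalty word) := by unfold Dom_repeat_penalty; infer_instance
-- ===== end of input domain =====

-- B replaces A's sentinel-and-state loop by a run-length scan over maximal runs of equal
-- characters (alternative decomposition; same O(n) cost).

-- ===== PORT A =====
-- Python iterates the word as 1-character strings plus a "" sentinel; VOWELS is a list of
-- 1-character strings.
def pyVOWELS : List String := "aeiouáéíóúůyý".toList.map (fun c => String.singleton c)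

def stepA (st : String × Int × Int) (ch : String) : String × Int × Int :=
  if ch == st.1 && pyVOWELS.contains ch then (st.1, st.2.1, st.2.2 + 1)
  else (ch, st.2.1 + st.2.2 ^ 3, 0)

def repeat_penalty (word : String) : Int :=
  let r := (word.toList.map (fun c => String.singleton c) ++ [""]).foldl stepA ("", 0, 0)
  r.2.1 + r.2.2 ^ 3

-- ===== PORT B =====
def vowelsB : List Char := "aeiouáéíóúůyý".toList

-- outer while loop of B: take one maximal run (inner while = takeWhile/dropWhile), score it
def rp_go : List Char → Int → Int
  | [], score => score
  | c :: rest, score =>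
    let k : Int := ((rest.takeWhile (fun d => d == c)).length : Int)
    let score' := if vowelsB.contains c then score + k ^ 3 else score
    rp_go (rest.dropWhile (fun d => d == c)) score'
termination_by cs _ => cs.length
decreasing_by
  simpa using Nat.lt_succ_of_le (List.length_dropWhile_le _ _)

def repeat_penalty_alt (word : String) : Int := rp_go word.toList 0

-- ===== PRECONDITION & SPEC =====
def Spec_repeat_penalty (word : String) (out : Int) : Prop := out = repeat_penalty_alt word
instance (word : String) (out : Int) : Decidable (Spec_repeat_penalty word out) := by unfold Spec_repeat_penalty; infer_instance

-- ===== CLAIM (what is proved, stated in full; the proofs are below) =====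
def Claim_equal_repeat_penalty : Prop := ∀ (word : String), Dom_repeat_penalty word → Spec_repeat_penalty word (repeat_penalty word)

-- ===== LEMMAS AND PROOFS =====

-- the value A's loop produces from an intermediate state
def finalA (l : List String) (old : String) (score pen : Int) : Int :=
  let r := l.foldl stepA (old, score, pen)
  r.2.1 + r.2.2 ^ 3

lemma finalA_cons (x : String) (l : List String) (old : String) (score pen : Int) :
    finalA (x :: l) old score pen = finalA l (stepA (old, score, pen) x).1
      (stepA (old, score, pen) x).2.1 (stepA (old, score, pen) x).2.2 := by
  simp [finalA, List.foldl]

lemma sing_ne_empty (c : Char) : String.singleton c ≠ "" := by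
  intro h
  have := congrArg String.toList h
  simp at this

lemma sing_inj (a b : Char) : String.singleton a = String.singleton b ↔ a = b := by
  constructor
  · intro h
    have := congrArg String.toList h
    simpa using this
  · intro h
    rw [h]

lemma empty_not_mem_pyVOWELS : "" ∉ pyVOWELS := by decide

lemma sing_mem_pyVOWELS (c : Char) : String.singleton c ∈ pyVOWELS ↔ c ∈ vowelsB := by
  unfold pyVOWELS vowelsB
  generalize "aeiouáéíóúůyý".toList = l
  induction l with
  | nil => simp
  | cons d t ih => simp [sing_inj, ih]

-- a vowel run: A accumulates penalty across equal vowels, flushing (pen+k)^3 at the boundary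
lemma run_vowel (n : Nat)
    (IH : ∀ cs : List Char, cs.length ≤ n → ∀ (old : String) (score : Int),
      (∀ c, cs.head? = some c → String.singleton c ≠ old) →
      finalA (cs.map String.singleton ++ [""]) old score 0 = rp_go cs score)
    (c : Char) (hv : c ∈ vowelsB) :
    ∀ rest : List Char, rest.length ≤ n → ∀ score pen : Int,
      finalA (rest.map String.singleton ++ [""]) (String.singleton c) score pen =
        rp_go (rest.dropWhile (fun d => d == c))
          (score + (pen + ((rest.takeWhile (fun d => d == c)).length : Int)) ^ 3) := by
  intro rest
  induction rest with
  | nil =>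
    intro _ score pen
    simp [finalA, List.foldl, stepA, rp_go, empty_not_mem_pyVOWELS]
  | cons d r ih =>
    intro hlen score pen
    by_cases hd : d = c
    · subst hd
      rw [List.map_cons, List.cons_append, finalA_cons]
      have hmem : String.singleton d ∈ pyVOWELS := (sing_mem_pyVOWELS d).mpr hv
      have hstep : stepA (String.singleton d, score, pen) (String.singleton d)
          = (String.singleton d, score, pen + 1) := by
        simp [stepA, hmem]
      rw [hstep]
      have hr : r.length ≤ n := by simp at hlen; omega
      rw [ih hr score (pen + 1)]
      simp only [List.takeWhile_cons, List.dropWhile_cons, beq_self_eq_true, if_true,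
        List.length_cons]
      congr 1
      push_cast
      ring
    · -- run boundary: flush pen^3 and restart at d, via IH applied to (d :: r) from a blank state
      have hIH := IH (d :: r) hlen "" (score + pen ^ 3)
        (by intro e he; simp at he; subst he; exact sing_ne_empty _)
      rw [List.map_cons, List.cons_append, finalA_cons] at hIH ⊢
      have h1 : stepA ("", score + pen ^ 3, 0) (String.singleton d)
          = (String.singleton d, score + pen ^ 3, 0) := by
        simp [stepA]
      have h2 : stepA (String.singleton c, score, pen) (String.singleton d)
          = (String.singleton d, score + pen ^ 3, 0) := by
        simp [stepA, sing_inj, hd]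
      rw [h2]
      rw [h1] at hIH
      rw [hIH]
      have hdc : (d == c) = false := by simpa using hd
      simp [hdc]

-- a non-vowel run: the penalty stays 0 throughout
lemma run_nonvowel (n : Nat)
    (IH : ∀ cs : List Char, cs.length ≤ n → ∀ (old : String) (score : Int),
      (∀ c, cs.head? = some c → String.singleton c ≠ old) →
      finalA (cs.map String.singleton ++ [""]) old score 0 = rp_go cs score)
    (c : Char) (hv : c ∉ vowelsB) :
    ∀ rest : List Char, rest.length ≤ n → ∀ score : Int,
      finalA (rest.map String.singleton ++ [""]) (String.singleton c) score 0 =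
        rp_go (rest.dropWhile (fun d => d == c)) score := by
  intro rest
  induction rest with
  | nil =>
    intro _ score
    simp [finalA, List.foldl, stepA, rp_go, empty_not_mem_pyVOWELS]
  | cons d r ih =>
    intro hlen score
    by_cases hd : d = c
    · subst hd
      rw [List.map_cons, List.cons_append, finalA_cons]
      have hmem : String.singleton d ∉ pyVOWELS := fun h => hv ((sing_mem_pyVOWELS d).mp h)
      have hstep : stepA (String.singleton d, score, 0) (String.singleton d)
          = (String.singleton d, score, 0) := by
        simp [stepA, hmem]
      rw [hstep]
      have hr : r.length ≤ n := by simp at hlen; omega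
      rw [ih hr score]
      simp
    · have hIH := IH (d :: r) hlen "" score
        (by intro e he; simp at he; subst he; exact sing_ne_empty _)
      rw [List.map_cons, List.cons_append, finalA_cons] at hIH ⊢
      have h1 : stepA ("", score, 0) (String.singleton d)
          = (String.singleton d, score, 0) := by
        simp [stepA]
      have h2 : stepA (String.singleton c, score, 0) (String.singleton d)
          = (String.singleton d, score, 0) := by
        simp [stepA, sing_inj, hd]
      rw [h2]
      rw [h1] at hIH
      rw [hIH]
      have hdc : (d == c) = false := by simpa using hd
      simp [hdc]

lemma main_lemma : ∀ (n : Nat) (cs : List Char), cs.length ≤ n → ∀ (old : String) (score : Int),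
    (∀ c, cs.head? = some c → String.singleton c ≠ old) →
    finalA (cs.map String.singleton ++ [""]) old score 0 = rp_go cs score := by
  intro n
  induction n with
  | zero =>
    intro cs hlen old score _
    have : cs = [] := List.length_eq_zero_iff.mp (Nat.le_zero.mp hlen)
    subst this
    simp [finalA, List.foldl, stepA, rp_go, empty_not_mem_pyVOWELS]
  | succ n IH =>
    intro cs hlen old score hhead
    match cs with
    | [] => simp [finalA, List.foldl, stepA, rp_go, empty_not_mem_pyVOWELS]
    | c :: rest =>
      rw [List.map_cons, List.cons_append, finalA_cons]
      have hne := hhead c rfl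
      have hstep : stepA (old, score, 0) (String.singleton c)
          = (String.singleton c, score, 0) := by
        simp [stepA, hne]
      rw [hstep]
      have hr : rest.length ≤ n := by simp at hlen; omega
      by_cases hv : c ∈ vowelsB
      · rw [run_vowel n IH c hv rest hr score 0]
        simp [rp_go, hv]
      · rw [run_nonvowel n IH c hv rest hr score]
        simp [rp_go, hv]

-- ===== VERDICT (by name: the statement is the Claim_ definition above) =====
theorem repeat_penalty_spec : Claim_equal_repeat_penalty := by
  intro word _
  unfold Spec_repeat_penalty repeat_penalty repeat_penalty_alt
  have := main_lemma word.toList.length word.toList le_rfl "" 0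
    (by intro c _; exact sing_ne_empty c)
  simpa [finalA] using this
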